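-- pv_equiv track=rewrite | github.com/tretap/grading_platform | Loop #41.py | loop_F_inal
-- ===== SOURCE A (Python) =====
-- def loop_F_inal(num):
-- 	_sum = ""
-- 	sum_ = ""
-- 	for i in range(1,num+1):
-- 		for j in range(1,i+1):
-- 			_sum += str(j)
--
-- 	for i in range(num, 0,-1):
-- 		for j in range(i,0,-1):
-- 			sum_ += str(j)
--
-- 	#for i in range(num, 0,-1):
--
-- 	return _sum + sum_[1::]
-- ===== SOURCE B (Python) =====
-- def loop_F_inal(num):
--     # Running-prefix decomposition: no inner loops; each row is the previous row
--     # extended by one number, rows are collected and joined once.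
--     fwd_rows = []
--     f = ""
--     for i in range(1, num + 1):
--         f += str(i)
--         fwd_rows.append(f)
--     rev_rows = []
--     b = ""
--     for i in range(1, num + 1):
--         b = str(i) + b
--         rev_rows.append(b)
--     _sum = "".join(fwd_rows)
--     sum_ = "".join(reversed(rev_rows))
--     return _sum + sum_[1:]
-- ===== Notes on version B (the rewrite author's own statement) =====
-- stated objective: alternative
-- what changed: Replaces both nested count-up/count-down loops by single loops that carry a running prefix string per direction, collect the rows in lists, and join them once (the reverse block joined in reversed order).
import Mathlib
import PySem

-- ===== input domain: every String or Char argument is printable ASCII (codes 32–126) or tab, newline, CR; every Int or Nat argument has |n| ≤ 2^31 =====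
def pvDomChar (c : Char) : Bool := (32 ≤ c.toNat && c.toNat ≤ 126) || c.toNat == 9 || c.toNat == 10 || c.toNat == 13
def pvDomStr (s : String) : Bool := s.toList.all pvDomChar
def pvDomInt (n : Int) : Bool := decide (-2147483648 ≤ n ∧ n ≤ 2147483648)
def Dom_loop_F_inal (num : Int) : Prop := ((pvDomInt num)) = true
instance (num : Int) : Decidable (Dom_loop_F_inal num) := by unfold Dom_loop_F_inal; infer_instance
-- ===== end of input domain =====

-- B replaces A's nested counting loops by single loops carrying a running prefix per direction,
-- collected into lists and joined once (alternative decomposition, same output).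


-- ===== PORT A =====
def loop_F_inal (num : Int) : String :=
  let _sum : String := (PySem.List.pyRange 1 (num + 1) 1).foldl
    (fun s i => (PySem.List.pyRange 1 (i + 1) 1).foldl (fun a j => a ++ PySem.Int.toStr j) s) ""
  let sum_ : String := (PySem.List.pyRange num 0 (-1)).foldl
    (fun s i => (PySem.List.pyRange i 0 (-1)).foldl (fun a j => a ++ PySem.Int.toStr j) s) ""
  _sum ++ PySem.Str.slice sum_ (some 1) none

-- ===== PORT B =====
def loop_F_inal_alt (num : Int) : String :=
  let p := (PySem.List.pyRange 1 (num + 1) 1).foldl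
    (fun (st : String × List String) i =>
      let f := st.1 ++ PySem.Int.toStr i
      (f, st.2 ++ [f])) ("", [])
  let q := (PySem.List.pyRange 1 (num + 1) 1).foldl
    (fun (st : String × List String) i =>
      let b := PySem.Int.toStr i ++ st.1
      (b, st.2 ++ [b])) ("", [])
  let _sum : String := PySem.Str.join "" p.2
  let sum_ : String := PySem.Str.join "" q.2.reverse
  _sum ++ PySem.Str.slice sum_ (some 1) none

-- ===== PRECONDITION & SPEC =====
def Spec_loop_F_inal (num : Int) (out : String) : Prop := out = loop_F_inal_alt num
instance (num : Int) (out : String) : Decidable (Spec_loop_F_inal num out) := by unfold Spec_loop_F_inal; infer_instance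

-- ===== CLAIM (what is proved, stated in full; the proofs are below) =====
def Claim_equal_loop_F_inal : Prop := ∀ (num : Int), Dom_loop_F_inal num → Spec_loop_F_inal num (loop_F_inal num)

-- ===== LEMMAS AND PROOFS =====

/-- Digits of `j` as characters. -/
def pvDs (j : Int) : List Char := (PySem.Int.toStr j).toList

/-- Characters of A's forward row `str(1)+…+str(i)`. -/
def pvR (i : Int) : List Char := ((PySem.List.pyRange 1 (i + 1) 1).map pvDs).flatten

/-- Characters of A's reverse row `str(i)+…+str(1)`. -/
def pvRr (i : Int) : List Char := ((PySem.List.pyRange i 0 (-1)).map pvDs).flatten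

theorem pvInner (l : List Int) (s : String) :
    ((l.foldl (fun a j => a ++ PySem.Int.toStr j) s)).toList
      = s.toList ++ (l.map pvDs).flatten := by
  induction l generalizing s with
  | nil => simp
  | cons x t ih => simp [ih, pvDs]

theorem pvOuter (g : Int → List Int) (l : List Int) (s : String) :
    ((l.foldl (fun s i => (g i).foldl (fun a j => a ++ PySem.Int.toStr j) s) s)).toList
      = s.toList ++ (l.map (fun i => ((g i).map pvDs).flatten)).flatten := by
  induction l generalizing s with
  | nil => simp
  | cons x t ih => simp [ih, pvInner]

theorem pvJoinNil (ps : List (List Char)) : PySem.Chars.join [] ps = ps.flatten := by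
  induction ps with
  | nil => simp [PySem.Chars.join_nil]
  | cons p rest ih =>
    cases rest with
    | nil => simp [PySem.Chars.join_singleton]
    | cons q r => simp [PySem.Chars.join_cons_cons, ih]

theorem pvR_succ (n : Nat) : pvR ((n : Int) + 1) = pvR n ++ pvDs ((n : Int) + 1) := by
  unfold pvR
  rw [PySem.List.pyRange_one_succ_right (by omega : (1:Int) ≤ (n : Int) + 1)]
  simp

theorem pvRr_succ (n : Nat) : pvRr ((n : Int) + 1) = pvDs ((n : Int) + 1) ++ pvRr n := by
  unfold pvRr
  rw [PySem.List.pyRange_neg_one_cons (by omega : (0:Int) < (n : Int) + 1)]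
  simp

theorem pvFwd (n : Nat) :
    (((PySem.List.pyRange 1 ((n : Int) + 1) 1).foldl
      (fun (st : String × List String) i =>
        let f := st.1 ++ PySem.Int.toStr i
        (f, st.2 ++ [f])) ("", []))).1.toList = pvR n ∧
    (((PySem.List.pyRange 1 ((n : Int) + 1) 1).foldl
      (fun (st : String × List String) i =>
        let f := st.1 ++ PySem.Int.toStr i
        (f, st.2 ++ [f])) ("", []))).2.map String.toList
      = (PySem.List.pyRange 1 ((n : Int) + 1) 1).map pvR := by
  induction n with
  | zero => simp [PySem.List.pyRange_one_eq_nil, pvR]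
  | succ n ih =>
    push_cast
    rw [PySem.List.pyRange_one_succ_right (by omega : (1:Int) ≤ (n : Int) + 1)]
    simp only [List.foldl_append, List.foldl_cons, List.foldl_nil]
    refine ⟨?_, ?_⟩
    · simp [ih.1, pvR_succ n, pvDs]
    · simp [ih.1, ih.2, pvR_succ n, pvDs]

theorem pvRev (n : Nat) :
    (((PySem.List.pyRange 1 ((n : Int) + 1) 1).foldl
      (fun (st : String × List String) i =>
        let b := PySem.Int.toStr i ++ st.1
        (b, st.2 ++ [b])) ("", []))).1.toList = pvRr n ∧
    (((PySem.List.pyRange 1 ((n : Int) + 1) 1).foldl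
      (fun (st : String × List String) i =>
        let b := PySem.Int.toStr i ++ st.1
        (b, st.2 ++ [b])) ("", []))).2.map String.toList
      = (PySem.List.pyRange 1 ((n : Int) + 1) 1).map pvRr := by
  induction n with
  | zero => simp [PySem.List.pyRange_one_eq_nil, pvRr]
  | succ n ih =>
    push_cast
    rw [PySem.List.pyRange_one_succ_right (by omega : (1:Int) ≤ (n : Int) + 1)]
    simp only [List.foldl_append, List.foldl_cons, List.foldl_nil]
    refine ⟨?_, ?_⟩
    · simp [ih.1, pvRr_succ n, pvDs]
    · simp [ih.1, ih.2, pvRr_succ n, pvDs]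

theorem pvFwdAll (num : Int) :
    (((PySem.List.pyRange 1 (num + 1) 1).foldl
      (fun (st : String × List String) i =>
        let f := st.1 ++ PySem.Int.toStr i
        (f, st.2 ++ [f])) ("", []))).2.map String.toList
      = (PySem.List.pyRange 1 (num + 1) 1).map pvR := by
  by_cases h : num ≤ 0
  · rw [PySem.List.pyRange_one_eq_nil (by omega)]; simp
  · have hn : num = ((num.toNat : Int)) := by omega
    rw [hn]; exact (pvFwd num.toNat).2

theorem pvRevAll (num : Int) :
    (((PySem.List.pyRange 1 (num + 1) 1).foldl
      (fun (st : String × List String) i =>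
        let b := PySem.Int.toStr i ++ st.1
        (b, st.2 ++ [b])) ("", []))).2.map String.toList
      = (PySem.List.pyRange 1 (num + 1) 1).map pvRr := by
  by_cases h : num ≤ 0
  · rw [PySem.List.pyRange_one_eq_nil (by omega)]; simp
  · have hn : num = ((num.toNat : Int)) := by omega
    rw [hn]; exact (pvRev num.toNat).2

theorem loop_F_inal_spec : Claim_equal_loop_F_inal := by
  intro num _
  unfold Spec_loop_F_inal loop_F_inal loop_F_inal_alt
  apply String.toList_inj.mp
  have h1 := pvOuter (fun i => PySem.List.pyRange 1 (i + 1) 1) (PySem.List.pyRange 1 (num + 1) 1) ""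
  have h2 := pvOuter (fun i => PySem.List.pyRange i 0 (-1)) (PySem.List.pyRange num 0 (-1)) ""
  have h3 := pvFwdAll num
  have h4 := pvRevAll num
  simp only [String.toList_append, PySem.Str.toList_slice, PySem.Str.toList_join,
    List.map_reverse, h1, h2, h3, h4]
  rw [PySem.List.pyRange_neg_one_eq_reverse num 0]
  simp [pvJoinNil, List.map_reverse]
  rfl
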